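-- pv_equiv track=rewrite | github.com/thehammer/advent-of-management | solutions/2025/day12/solution.py | can_fit_region
-- ===== SOURCE A (Python) =====
-- def count_cells(shape_lines):
--     """Count # cells in a shape."""
--     return sum(row.count('#') for row in shape_lines)
--
-- def can_place(grid, w, h, shape_cells, start_r, start_c):
--     """Check if shape can be placed at position."""
--     for dr, dc in shape_cells:
--         r, c = start_r + dr, start_c + dc
--         if r < 0 or r >= h or c < 0 or c >= w:
--             return False
--         if grid[r][c]:
--             return False
--     return True
--
-- def place(grid, shape_cells, start_r, start_c):
--     """Place shape on grid."""
--     for dr, dc in shape_cells: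
--         grid[start_r + dr][start_c + dc] = True
--
-- def unplace(grid, shape_cells, start_r, start_c):
--     """Remove shape from grid."""
--     for dr, dc in shape_cells:
--         grid[start_r + dr][start_c + dc] = False
--
-- def solve_backtrack(w, h, all_orientations, pieces_to_place):
--     """Try to place all pieces using backtracking.
--
--     pieces_to_place: list of (shape_idx, count) for pieces still to place
--     """
--     grid = [[False] * w for _ in range(h)]
--
--     # Flatten pieces list - group identical shapes together for symmetry breaking
--     pieces = []
--     for shape_idx, count in pieces_to_place:
--         for _ in range(count):
--             pieces.append(shape_idx)
--
--     if not pieces: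
--         return True
--
--     def backtrack(piece_idx, min_pos=0):
--         if piece_idx >= len(pieces):
--             return True
--
--         shape_idx = pieces[piece_idx]
--         orientations = all_orientations[shape_idx]
--
--         # Try all positions from min_pos onward
--         # If next piece is same type, use symmetry breaking (start from same position)
--         next_min_pos = 0
--         if piece_idx + 1 < len(pieces) and pieces[piece_idx + 1] == shape_idx:
--             same_type = True
--         else:
--             same_type = False
--
--         for pos in range(min_pos, w * h):
--             r, c = pos // w, pos % w
--             for o_idx, orientation in enumerate(orientations):
--                 if can_place(grid, w, h, orientation, r, c):
--                     place(grid, orientation, r, c)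
--                     # Symmetry breaking: if next piece is same type, don't try earlier positions
--                     next_start = pos if same_type else 0
--                     if backtrack(piece_idx + 1, next_start):
--                         return True
--                     unplace(grid, orientation, r, c)
--
--         return False
--
--     return backtrack(0, 0)
--
-- def can_fit_region(w, h, shapes, counts, all_orientations):
--     """Check if shapes with given counts can fit in w x h region."""
--     # First, simple area check
--     cells_per_shape = [count_cells(shapes[i]) for i in range(len(shapes))]
--     area = w * h
--     needed = sum(c * cells_per_shape[i] for i, c in enumerate(counts))
--
--     if needed > area:
--         return False
--
--     # Build pieces list
--     pieces_to_place = [(i, counts[i]) for i in range(len(counts)) if counts[i] > 0]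
--
--     if not pieces_to_place:
--         return True
--
--     # Use backtracking
--     return solve_backtrack(w, h, all_orientations, pieces_to_place)
-- ===== SOURCE B (Python) =====
-- def _mask(w, h, cells, r, c):
--     """Bitmask of the cells covered by a placement, or None if any cell is out of bounds."""
--     m = 0
--     for dr, dc in cells:
--         rr, cc = r + dr, c + dc
--         if not (0 <= rr < h and 0 <= cc < w):
--             return None
--         m |= 1 << (rr * w + cc)
--     return m
--
--
-- def _placements_for(w, h, area, oris):
--     """All valid placements of one shape: (position, occupancy bitmask), position-major."""
--     plist = []
--     for pos in range(area):
--         r, c = divmod(pos, w)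
--         for cells in oris:
--             m = _mask(w, h, cells, r, c)
--             if m is not None:
--                 plist.append((pos, m))
--     return plist
--
--
-- def can_fit_region(w, h, shapes, counts, all_orientations):
--     """Check if shapes with given counts can fit in w x h region (bitmask backtracking)."""
--     area = w * h
--     needed = sum(counts[i] * sum(row.count('#') for row in shapes[i])
--                  for i in range(len(counts)))
--     if needed > area:
--         return False
--
--     pieces = [i for i in range(len(counts)) for _ in range(counts[i])]
--     if not pieces:
--         return True
--
--     placements = [_placements_for(w, h, area, oris) for oris in all_orientations]
--
--     def search(occupied, rest, min_pos):
--         if not rest: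
--             return True
--         s = rest[0]
--         nxt_same = len(rest) > 1 and rest[1] == s
--         for pos, m in placements[s]:
--             if pos >= min_pos and occupied & m == 0:
--                 if search(occupied | m, rest[1:], pos if nxt_same else 0):
--                     return True
--         return False
--
--     return search(0, pieces, 0)
-- ===== Notes on version B (the rewrite author's own statement) =====
-- stated objective: alternative
-- what changed: The mutable boolean grid with per-cell can_place/place/unplace loops is replaced by a single integer occupancy bitmask plus a precomputed per-shape table of valid (position, mask) placements, so the backtracking step is one AND test and one OR instead of per-cell scans over a list-of-lists.
-- outside the precondition, e.g. on can_fit_region(1, 1, [['##'], ['#']], [0, 2], [[[(0, 0), (0, 1)]]]): A returns False, B returns False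
import Mathlib
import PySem

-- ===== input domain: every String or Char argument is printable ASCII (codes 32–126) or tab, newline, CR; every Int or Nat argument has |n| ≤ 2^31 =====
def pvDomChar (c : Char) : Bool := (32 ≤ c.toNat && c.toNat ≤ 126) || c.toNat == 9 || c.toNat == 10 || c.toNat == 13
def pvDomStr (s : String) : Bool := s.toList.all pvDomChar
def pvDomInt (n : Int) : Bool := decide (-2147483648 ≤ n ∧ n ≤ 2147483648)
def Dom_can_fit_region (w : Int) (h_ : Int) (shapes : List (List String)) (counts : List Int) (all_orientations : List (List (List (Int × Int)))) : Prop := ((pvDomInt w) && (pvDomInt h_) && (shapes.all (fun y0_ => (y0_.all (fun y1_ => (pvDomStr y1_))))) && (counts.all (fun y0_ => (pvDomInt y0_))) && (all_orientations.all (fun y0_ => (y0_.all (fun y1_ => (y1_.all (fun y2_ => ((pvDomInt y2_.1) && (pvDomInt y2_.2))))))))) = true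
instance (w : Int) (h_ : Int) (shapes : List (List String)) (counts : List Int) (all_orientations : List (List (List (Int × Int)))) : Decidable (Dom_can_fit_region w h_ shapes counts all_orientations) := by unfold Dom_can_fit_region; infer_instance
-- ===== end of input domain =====

-- B replaces A's mutable boolean grid (per-cell place/unplace/can_place scans) by an integer
-- occupancy bitmask with a precomputed per-shape table of valid (position, mask) placements.
-- A mutates no argument; the equivalence is about the return value.

-- ===== PORT A =====

-- sum(row.count('#') for row in shape_lines)
def count_cells (shape_lines : List String) : Int :=
  (shape_lines.map (fun row => PySem.Str.count row "#")).sum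

-- can_place(grid, w, h, shape_cells, start_r, start_c): per-cell bounds check then grid probe.
-- grid[r][c] is read only after the bounds test succeeded, where pyGetD is exact.
def can_place_A (grid : List (List Bool)) (w h : Int) : List (Int × Int) → Int → Int → Bool
  | [], _, _ => true
  | (dr, dc) :: rest, sr, sc =>
    let r := sr + dr
    let c := sc + dc
    if r < 0 || r ≥ h || c < 0 || c ≥ w then false
    else if PySem.List.pyGetD (PySem.List.pyGetD grid r []) c false then false
    else can_place_A grid w h rest sr sc

-- place(grid, shape_cells, start_r, start_c): grid[r+dr][c+dc] = True for each cell
-- (functional update; place is only invoked on in-bounds cells, where pySetD is exact).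
def place_A (grid : List (List Bool)) (cells : List (Int × Int)) (sr sc : Int) : List (List Bool) :=
  cells.foldl (fun g p =>
    let r := sr + p.1
    let c := sc + p.2
    PySem.List.pySetD g r (PySem.List.pySetD (PySem.List.pyGetD g r []) c true)) grid

-- backtrack(piece_idx, min_pos): the mutated grid is threaded as an argument; after a failed
-- recursive call Python's unplace restores exactly the pre-place grid (the placed cells were
-- free, can_place had just checked them), so the loop continues with the original grid.
-- all_orientations[shape_idx] is in range under Pre_ (outside it Python raises), pyGetD exact.
def backtrack_A (w h : Int) (ao : List (List (List (Int × Int)))) :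
    List (List Bool) → List Int → Int → Bool
  | _, [], _ => true
  | grid, s :: rest, min_pos =>
    let oris := PySem.List.pyGetD ao s []
    let same_type := rest.head? == some s
    (PySem.List.pyRange min_pos (w * h) 1).any (fun pos =>
      let r := PySem.Int.floordiv pos w
      let c := PySem.Int.mod pos w
      oris.any (fun cells =>
        can_place_A grid w h cells r c &&
        backtrack_A w h ao (place_A grid cells r c) rest (if same_type then pos else 0)))

def can_fit_region (w : Int) (h_ : Int) (shapes : List (List String)) (counts : List Int) (all_orientations : List (List (List (Int × Int)))) : Bool :=
  -- cells_per_shape = [count_cells(shapes[i]) for i in range(len(shapes))]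
  let cells_per_shape := shapes.map count_cells
  let area := w * h_
  -- needed = sum(c * cells_per_shape[i] for i, c in enumerate(counts)); index in range under Pre_
  let needed := ((PySem.List.enumerate counts).map
    (fun p => p.2 * PySem.List.pyGetD cells_per_shape p.1 0)).sum
  if needed > area then false
  else
    let pieces_to_place := (PySem.List.enumerate counts).filter (fun p => p.2 > 0)
    if pieces_to_place = [] then true
    else
      -- solve_backtrack: grid = [[False]*w for _ in range(h)]
      let grid := List.replicate h_.toNat (List.replicate w.toNat false)
      -- pieces: for (i, count) in pieces_to_place: count copies of i
      let pieces := pieces_to_place.foldl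
        (fun acc p => acc ++ (PySem.List.pyRange 0 p.2 1).map (fun _ => p.1)) []
      if pieces = [] then true
      else backtrack_A w h_ all_orientations grid pieces 0

-- ===== PORT B =====

-- _mask(w, h, cells, r, c), with the running mask as accumulator; the shift count
-- rr*w+cc is nonnegative whenever the bounds test passes, so toNat is exact.
def maskAux (w h : Int) (r c : Int) : List (Int × Int) → Nat → Option Nat
  | [], m => some m
  | (dr, dc) :: rest, m =>
    let rr := r + dr
    let cc := c + dc
    if 0 ≤ rr ∧ rr < h ∧ 0 ≤ cc ∧ cc < w then
      maskAux w h r c rest (m ||| (1 <<< (rr * w + cc).toNat))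
    else none

-- _placements_for(w, h, area, oris): append loop over positions and orientations
def placements_for (w h area : Int) (oris : List (List (Int × Int))) : List (Int × Nat) :=
  (PySem.List.pyRange 0 area 1).foldl (fun acc pos =>
    let r := PySem.Int.floordiv pos w
    let c := PySem.Int.mod pos w
    oris.foldl (fun acc2 cells =>
      match maskAux w h r c cells 0 with
      | some m => acc2 ++ [(pos, m)]
      | none => acc2) acc) []

-- search(occupied, rest, min_pos); placements[s] is in range under Pre_, pyGetD exact
def search_B (placements : List (List (Int × Nat))) : Nat → List Int → Int → Bool
  | _, [], _ => true
  | occ, s :: rest, min_pos =>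
    let nxt_same := rest.head? == some s
    (PySem.List.pyGetD placements s []).any (fun pm =>
      (decide (pm.1 ≥ min_pos) && (occ &&& pm.2 == 0)) &&
      search_B placements (occ ||| pm.2) rest (if nxt_same then pm.1 else 0))

def can_fit_region_alt (w : Int) (h_ : Int) (shapes : List (List String)) (counts : List Int) (all_orientations : List (List (List (Int × Int)))) : Bool :=
  let area := w * h_
  let needed := ((PySem.List.pyRange 0 counts.length 1).map (fun i =>
    PySem.List.pyGetD counts i 0 *
      ((PySem.List.pyGetD shapes i []).map (fun row => PySem.Str.count row "#")).sum)).sum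
  if needed > area then false
  else
    let pieces := (PySem.List.pyRange 0 counts.length 1).foldl
      (fun acc i => acc ++ (PySem.List.pyRange 0 (PySem.List.pyGetD counts i 0) 1).map (fun _ => i)) []
    if pieces = [] then true
    else
      let placements := all_orientations.map (placements_for w h_ area)
      search_B placements 0 pieces 0

-- ===== PRECONDITION & SPEC =====
-- Pre_ excludes inputs where counts is longer than shapes or where some positive count sits at an
-- index with no orientation entry: there Python A raises IndexError (immediately for shapes, and
-- for all_orientations as soon as the search reaches such a piece) or returns only accidentally
-- when the search happens to stop earlier.
def Pre_can_fit_region (w : Int) (h_ : Int) (shapes : List (List String)) (counts : List Int) (all_orientations : List (List (List (Int × Int)))) : Prop :=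
  counts.length ≤ shapes.length ∧
  ∀ p ∈ PySem.List.enumerate counts, p.2 > 0 → p.1 < (all_orientations.length : Int)
instance (w : Int) (h_ : Int) (shapes : List (List String)) (counts : List Int) (all_orientations : List (List (List (Int × Int)))) : Decidable (Pre_can_fit_region w h_ shapes counts all_orientations) := by unfold Pre_can_fit_region; infer_instance

def pvWitness_can_fit_region : Int × Int × List (List String) × List Int × (List (List (List (Int × Int)))) :=
  (2, 1, [["##"]], [1], [[[(0, 0), (0, 1)]]])

def Spec_can_fit_region (w : Int) (h_ : Int) (shapes : List (List String)) (counts : List Int) (all_orientations : List (List (List (Int × Int)))) (out : Bool) : Prop := out = can_fit_region_alt w h_ shapes counts all_orientations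
instance (w : Int) (h_ : Int) (shapes : List (List String)) (counts : List Int) (all_orientations : List (List (List (Int × Int)))) (out : Bool) : Decidable (Spec_can_fit_region w h_ shapes counts all_orientations out) := by unfold Spec_can_fit_region; infer_instance

-- ===== CLAIM (what is proved, stated in full; the proofs are below) =====
def Claim_equal_can_fit_region : Prop := ∀ (w : Int) (h_ : Int) (shapes : List (List String)) (counts : List Int) (all_orientations : List (List (List (Int × Int)))), Dom_can_fit_region w h_ shapes counts all_orientations → Pre_can_fit_region w h_ shapes counts all_orientations → Spec_can_fit_region w h_ shapes counts all_orientations (can_fit_region w h_ shapes counts all_orientations)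

-- ===== LEMMAS AND PROOFS =====

theorem pv_witness_ok :
    Dom_can_fit_region (pvWitness_can_fit_region.1) (pvWitness_can_fit_region.2.1) (pvWitness_can_fit_region.2.2.1) (pvWitness_can_fit_region.2.2.2.1) (pvWitness_can_fit_region.2.2.2.2) ∧
    Pre_can_fit_region (pvWitness_can_fit_region.1) (pvWitness_can_fit_region.2.1) (pvWitness_can_fit_region.2.2.1) (pvWitness_can_fit_region.2.2.2.1) (pvWitness_can_fit_region.2.2.2.2) := by
  decide

theorem pv_eq_zero_iff_testBit (n : Nat) : n = 0 ↔ ∀ i, n.testBit i = false := by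
  constructor
  · rintro rfl i; exact Nat.zero_testBit i
  · intro h; apply Nat.eq_of_testBit_eq; intro i; simp [h i]

theorem pv_and_or_zero (x a b : Nat) : (x &&& (a ||| b) = 0) ↔ (x &&& a = 0 ∧ x &&& b = 0) := by
  simp only [pv_eq_zero_iff_testBit, Nat.testBit_and, Nat.testBit_or]
  constructor
  · intro h
    constructor <;> intro i <;> have := h i <;>
      cases hx : x.testBit i <;> cases ha : a.testBit i <;> cases hb : b.testBit i <;> simp_all
  · rintro ⟨h1, h2⟩ i
    have := h1 i; have := h2 i
    cases hx : x.testBit i <;> cases ha : a.testBit i <;> cases hb : b.testBit i <;> simp_all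

theorem pv_and_shift_zero (x i : Nat) : (x &&& (1 <<< i) = 0) ↔ x.testBit i = false := by
  rw [Nat.one_shiftLeft]
  simp only [pv_eq_zero_iff_testBit, Nat.testBit_and]
  constructor
  · intro h
    have := h i
    simpa [Nat.testBit_two_pow] using this
  · intro h j
    by_cases hj : j = i
    · subst hj; simp [h]
    · simp [Nat.testBit_two_pow]; intro _ h2; exact hj h2.symm

theorem pv_testBit_or_shift (x : Nat) (i j : Nat) :
    (x ||| (1 <<< i)).testBit j = (x.testBit j || decide (i = j)) := by
  rw [Nat.one_shiftLeft, Nat.testBit_or, Nat.testBit_two_pow]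

theorem pv_pos_inj {w r c r' c' : Nat} (hc : c < w) (hc' : c' < w)
    (h : r * w + c = r' * w + c') : r = r' ∧ c = c' := by
  have hw : 0 < w := Nat.lt_of_le_of_lt (Nat.zero_le c) hc
  have h1 : (c + r * w) / w = r := by
    rw [Nat.add_mul_div_right _ _ hw, Nat.div_eq_of_lt hc, Nat.zero_add]
  have h2 : (c' + r' * w) / w = r' := by
    rw [Nat.add_mul_div_right _ _ hw, Nat.div_eq_of_lt hc', Nat.zero_add]
  have hrr : r = r' := by rw [← h1, ← h2, Nat.add_comm c, Nat.add_comm c', h]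
  constructor
  · exact hrr
  · subst hrr; omega

-- The simulation invariant: grid is the list-of-lists image of the bitmask occ.
def GridRel (w h : Int) (grid : List (List Bool)) (occ : Nat) : Prop :=
  grid.length = h.toNat ∧
  (∀ r : Nat, r < h.toNat → (grid.getD r []).length = w.toNat) ∧
  (∀ r c : Nat, r < h.toNat → c < w.toNat →
    (grid.getD r []).getD c false = occ.testBit (r * w.toNat + c))

theorem maskAux_acc (w h r c : Int) (cells : List (Int × Int)) :
    ∀ acc, maskAux w h r c cells acc = (maskAux w h r c cells 0).map (· ||| acc) := by
  induction cells with
  | nil => intro acc; simp [maskAux]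
  | cons d rest ih =>
    intro acc
    obtain ⟨dr, dc⟩ := d
    simp only [maskAux]
    split
    · rw [ih, ih (0 ||| _), Option.map_map]
      congr 1
      funext y
      simp [Nat.or_assoc, Nat.or_comm, Nat.or_left_comm]
    · rfl

theorem canplace_eq (w h : Int) (grid : List (List Bool)) (occ : Nat)
    (hrel : GridRel w h grid occ) (cells : List (Int × Int)) (sr sc : Int) :
    can_place_A grid w h cells sr sc =
      (match maskAux w h sr sc cells 0 with
       | none => false
       | some m => (occ &&& m == 0)) := by
  induction cells with
  | nil => simp [can_place_A, maskAux]
  | cons d rest ih =>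
    obtain ⟨dr, dc⟩ := d
    simp only [can_place_A, maskAux]
    by_cases hb : 0 ≤ sr + dr ∧ sr + dr < h ∧ 0 ≤ sc + dc ∧ sc + dc < w
    · rw [if_neg (by simp; omega), if_pos hb]
      obtain ⟨h1, h2, h3, h4⟩ := hb
      obtain ⟨a, ha⟩ : ∃ a : Nat, sr + dr = (a : Int) := ⟨(sr+dr).toNat, (Int.toNat_of_nonneg h1).symm⟩
      obtain ⟨b, hbb⟩ : ∃ b : Nat, sc + dc = (b : Int) := ⟨(sc+dc).toNat, (Int.toNat_of_nonneg h3).symm⟩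
      have hw0 : 0 < w := lt_of_le_of_lt h3 h4
      have hwn : w = (w.toNat : Int) := (Int.toNat_of_nonneg (le_of_lt hw0)).symm
      have hidx : ((sr + dr) * w + (sc + dc)).toNat = a * w.toNat + b := by
        rw [ha, hbb, hwn,
          show ((a : Int) * (w.toNat : Int) + (b : Int)) = ((a * w.toNat + b : Nat) : Int) by
            push_cast; ring]
        exact Int.toNat_natCast _
      have hlta : a < h.toNat := by omega
      have hltb : b < w.toNat := by omega
      have hcell : PySem.List.pyGetD (PySem.List.pyGetD grid (sr + dr) []) (sc + dc) false
          = occ.testBit (a * w.toNat + b) := by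
        rw [ha, hbb, PySem.List.pyGetD_natCast, PySem.List.pyGetD_natCast]
        exact hrel.2.2 a b hlta hltb
      rw [hcell, hidx, maskAux_acc, Nat.zero_or]
      cases hmr : maskAux w h sr sc rest 0 with
      | none =>
        rw [hmr] at ih
        simp only [Option.map_none]
        cases hob : occ.testBit (a * w.toNat + b) <;> simp [hob, ih]
      | some m =>
        rw [hmr] at ih
        simp only [Option.map_some]
        have key : (occ &&& (m ||| 1 <<< (a * w.toNat + b)) == 0)
            = ((!occ.testBit (a * w.toNat + b)) && (occ &&& m == 0)) := by
          apply Bool.eq_iff_iff.mpr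
          cases hob : occ.testBit (a * w.toNat + b) <;>
            simp [pv_and_or_zero, pv_and_shift_zero, hob]
        rw [key]
        cases hob : occ.testBit (a * w.toNat + b) <;> simp [hob, ih]
    · rw [if_pos (by simp; omega), if_neg hb]

theorem pv_getD_set_self {α : Type} (l : List α) (i : Nat) (v d : α) (h : i < l.length) :
    (l.set i v).getD i d = v := by
  rw [List.getD_eq_getElem _ _ (by simpa using h)]
  simp

theorem pv_getD_set_ne {α : Type} (l : List α) (i j : Nat) (v d : α) (h : j ≠ i) :
    (l.set i v).getD j d = l.getD j d := by
  by_cases hj : j < l.length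
  · rw [List.getD_eq_getElem _ _ (by simpa using hj), List.getD_eq_getElem _ _ hj,
      List.getElem_set, if_neg (fun he => absurd he.symm h)]
  · rw [List.getD_eq_default _ _ (by simpa using hj), List.getD_eq_default _ _ (by omega)]

theorem setcell_rel (w h : Int) (grid : List (List Bool)) (occ : Nat)
    (hrel : GridRel w h grid occ) (a b : Nat) (ha : a < h.toNat) (hb : b < w.toNat) :
    GridRel w h
      (PySem.List.pySetD grid (a : Int)
        (PySem.List.pySetD (PySem.List.pyGetD grid (a : Int) []) (b : Int) true))
      (occ ||| (1 <<< (a * w.toNat + b))) := by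
  obtain ⟨hlen, hrow, hcell⟩ := hrel
  rw [PySem.List.pySetD_natCast, PySem.List.pySetD_natCast, PySem.List.pyGetD_natCast]
  have hlena : a < grid.length := by omega
  have hlenb : b < (grid.getD a []).length := by rw [hrow a ha]; exact hb
  refine ⟨by simpa using hlen, ?_, ?_⟩
  · intro r hr
    by_cases hra : r = a
    · subst hra
      rw [pv_getD_set_self _ _ _ _ hlena]
      simpa using hrow r hr
    · rw [pv_getD_set_ne _ _ _ _ _ hra]
      exact hrow r hr
  · intro r c hr hc
    rw [pv_testBit_or_shift]
    by_cases hra : r = a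
    · subst hra
      rw [pv_getD_set_self _ _ _ _ hlena]
      by_cases hcb : c = b
      · subst hcb
        rw [pv_getD_set_self _ _ _ _ hlenb]
        simp
      · rw [pv_getD_set_ne _ _ _ _ _ hcb, hcell r c hr hc]
        have hbc : ¬ (b = c) := fun he => hcb he.symm
        simp [hbc]
    · rw [pv_getD_set_ne _ _ _ _ _ hra, hcell r c hr hc]
      have : ¬ (a * w.toNat + b = r * w.toNat + c) := by
        intro he
        exact hra ((pv_pos_inj hb hc he).1.symm)
      simp [this]

theorem place_rel (w h : Int) (sr sc : Int) :
    ∀ (cells : List (Int × Int)) (grid : List (List Bool)) (occ : Nat) (m : Nat),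
      GridRel w h grid occ → maskAux w h sr sc cells 0 = some m →
      GridRel w h (place_A grid cells sr sc) (occ ||| m) := by
  intro cells
  induction cells with
  | nil =>
    intro grid occ m hrel hm
    simp only [maskAux, Option.some.injEq] at hm
    subst hm
    simpa [place_A] using hrel
  | cons d rest ih =>
    intro grid occ m hrel hm
    obtain ⟨dr, dc⟩ := d
    simp only [maskAux] at hm
    split at hm
    case isTrue hb =>
      obtain ⟨h1, h2, h3, h4⟩ := hb
      rw [maskAux_acc] at hm
      cases hmr : maskAux w h sr sc rest 0 with
      | none => rw [hmr] at hm; simp at hm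
      | some m0 =>
        rw [hmr] at hm
        simp only [Nat.zero_or, Option.map_some, Option.some.injEq] at hm
        obtain ⟨a, ha⟩ : ∃ a : Nat, sr + dr = (a : Int) := ⟨(sr+dr).toNat, (Int.toNat_of_nonneg h1).symm⟩
        obtain ⟨b, hbb⟩ : ∃ b : Nat, sc + dc = (b : Int) := ⟨(sc+dc).toNat, (Int.toNat_of_nonneg h3).symm⟩
        have hw0 : 0 < w := lt_of_le_of_lt h3 h4
        have hwn : w = (w.toNat : Int) := (Int.toNat_of_nonneg (le_of_lt hw0)).symm
        have hidx : ((sr + dr) * w + (sc + dc)).toNat = a * w.toNat + b := by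
          rw [ha, hbb, hwn,
            show ((a : Int) * (w.toNat : Int) + (b : Int)) = ((a * w.toNat + b : Nat) : Int) by
              push_cast; ring]
          exact Int.toNat_natCast _
        have hstep : GridRel w h
            (PySem.List.pySetD grid (sr + dr)
              (PySem.List.pySetD (PySem.List.pyGetD grid (sr + dr) []) (sc + dc) true))
            (occ ||| (1 <<< (a * w.toNat + b))) := by
          rw [ha, hbb]
          exact setcell_rel w h grid occ hrel a b (by omega) (by omega)
        have hplace : place_A grid ((dr, dc) :: rest) sr sc =
            place_A (PySem.List.pySetD grid (sr + dr)
              (PySem.List.pySetD (PySem.List.pyGetD grid (sr + dr) []) (sc + dc) true)) rest sr sc := by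
          simp [place_A]
        rw [hplace, ← hm]
        have := ih _ _ m0 hstep hmr
        have horder : occ ||| 1 <<< (a * w.toNat + b) ||| m0
            = occ ||| (m0 ||| 1 <<< ((sr + dr) * w + (sc + dc)).toNat) := by
          rw [hidx, Nat.or_assoc]
          congr 1
          exact Nat.or_comm _ _
        rwa [horder] at this
    case isFalse => simp at hm

theorem foldl_match_append {α : Type} (f : α → Option Nat) (pos : Int) :
    ∀ (l : List α) (acc : List (Int × Nat)),
      l.foldl (fun a x => match f x with | some m => a ++ [(pos, m)] | none => a) acc
        = acc ++ l.filterMap (fun x => (f x).map (fun m => (pos, m))) := by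
  intro l
  induction l with
  | nil => intro acc; simp
  | cons x xs ih =>
    intro acc
    cases hfx : f x <;> simp [List.foldl_cons, hfx, ih, List.filterMap_cons]

theorem placements_for_eq (w h area : Int) (oris : List (List (Int × Int))) :
    placements_for w h area oris
      = (PySem.List.pyRange 0 area 1).flatMap (fun pos =>
          oris.filterMap (fun cells =>
            (maskAux w h (PySem.Int.floordiv pos w) (PySem.Int.mod pos w) cells 0).map
              (fun m => (pos, m)))) := by
  unfold placements_for
  have hF : (fun (acc : List (Int × Nat)) (pos : Int) =>
      oris.foldl (fun acc2 cells =>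
        match maskAux w h (PySem.Int.floordiv pos w) (PySem.Int.mod pos w) cells 0 with
        | some m => acc2 ++ [(pos, m)]
        | none => acc2) acc)
      = (fun acc pos => acc ++ oris.filterMap (fun cells =>
          (maskAux w h (PySem.Int.floordiv pos w) (PySem.Int.mod pos w) cells 0).map
            (fun m => (pos, m)))) := by
    funext acc pos
    exact foldl_match_append _ pos oris acc
  rw [hF, PySem.List.foldl_append_eq_flatMap]
  simp

theorem search_eq (w h : Int) (ao : List (List (List (Int × Int)))) :
    ∀ (pieces : List Int) (grid : List (List Bool)) (occ : Nat) (min_pos : Int),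
      GridRel w h grid occ →
      (∀ s ∈ pieces, 0 ≤ s ∧ s < (ao.length : Int)) →
      0 ≤ min_pos →
      backtrack_A w h ao grid pieces min_pos
        = search_B (ao.map (placements_for w h (w * h))) occ pieces min_pos := by
  intro pieces
  induction pieces with
  | nil => intro grid occ mp _ _ _; simp [backtrack_A, search_B]
  | cons s rest ih =>
    intro grid occ min_pos hrel hin hmp
    obtain ⟨hs0, hslt⟩ := hin s (by simp)
    have hinrest : ∀ t ∈ rest, 0 ≤ t ∧ t < (ao.length : Int) := by
      intro t ht; exact hin t (by simp [ht])
    obtain ⟨k, hk⟩ : ∃ k : Nat, s = (k : Int) := ⟨s.toNat, (Int.toNat_of_nonneg hs0).symm⟩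
    subst hk
    have hklt : k < ao.length := by exact_mod_cast hslt
    have hgetA : PySem.List.pyGetD ao (k : Int) [] = ao[k] := by
      rw [PySem.List.pyGetD_natCast]; exact List.getD_eq_getElem _ _ hklt
    have hgetB : PySem.List.pyGetD (ao.map (placements_for w h (w * h))) (k : Int) []
        = placements_for w h (w * h) ao[k] := by
      rw [PySem.List.pyGetD_natCast, List.getD_eq_getElem _ _ (by simpa using hklt)]
      simp
    simp only [backtrack_A, search_B, hgetA, hgetB, placements_for_eq]
    apply Bool.eq_iff_iff.mpr
    simp only [List.any_eq_true, List.mem_flatMap, List.mem_filterMap,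
      PySem.List.mem_pyRange_one, Option.map_eq_some_iff, Bool.and_eq_true]
    constructor
    · rintro ⟨pos, ⟨hpos1, hpos2⟩, cells, hcells, hcan, hbt⟩
      rw [canplace_eq w h grid occ hrel] at hcan
      cases hm : maskAux w h (PySem.Int.floordiv pos w) (PySem.Int.mod pos w) cells 0 with
      | none => rw [hm] at hcan; simp at hcan
      | some m =>
        rw [hm] at hcan
        have hrel' := place_rel w h _ _ cells grid occ m hrel hm
        have hnxt0 : (0 : Int) ≤ (if (rest.head? == some (k : Int)) = true then pos else 0) := by
          split <;> omega
        rw [ih _ _ _ hrel' hinrest hnxt0] at hbt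
        exact ⟨(pos, m), ⟨pos, ⟨by omega, hpos2⟩, cells, hcells, m, hm, rfl⟩,
          ⟨by simp; omega, hcan⟩, hbt⟩
    · rintro ⟨pm, ⟨pos, ⟨hpos1, hpos2⟩, cells, hcells, m, hm, hpm⟩, ⟨hge, hocc⟩, hs⟩
      cases hpm
      have hrel' := place_rel w h _ _ cells grid occ m hrel hm
      have hnxt0 : (0 : Int) ≤ (if (rest.head? == some (k : Int)) = true then pos else 0) := by
        split <;> omega
      refine ⟨pos, ⟨by simpa using hge, hpos2⟩, cells, hcells, ?_, ?_⟩
      · rw [canplace_eq w h grid occ hrel, hm]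
        exact hocc
      · rw [ih _ _ _ hrel' hinrest hnxt0]
        exact hs

theorem pv_flatMap_map {α β γ : Type} (l : List α) (f : α → β) (g : β → List γ) :
    (l.map f).flatMap g = l.flatMap (fun x => g (f x)) := by
  induction l with
  | nil => rfl
  | cons x xs ih => simp [List.flatMap_cons, ih]

theorem pv_flatMap_filter {α β : Type} (l : List α) (q : α → Bool) (g : α → List β)
    (hg : ∀ x ∈ l, q x = false → g x = []) :
    (l.filter q).flatMap g = l.flatMap g := by
  induction l with
  | nil => rfl
  | cons x xs ih =>
    have hxs : ∀ x ∈ xs, q x = false → g x = [] := fun y hy => hg y (by simp [hy])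
    cases hqx : q x with
    | true => simp [List.filter_cons, hqx, List.flatMap_cons, ih hxs]
    | false =>
      simp [List.filter_cons, hqx, List.flatMap_cons, ih hxs, hg x (by simp) hqx]

theorem pv_range_nil_iff (a b : Int) : PySem.List.pyRange a b 1 = [] ↔ b ≤ a := by
  constructor
  · intro hn
    by_contra hab
    rw [PySem.List.pyRange_one_cons (by omega)] at hn
    exact List.cons_ne_nil _ _ hn
  · exact PySem.List.pyRange_one_eq_nil

-- the flattened pieces list, as both ports compute it
theorem pieces_eq (counts : List Int) :
    ((PySem.List.enumerate counts).filter (fun p => p.2 > 0)).foldl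
        (fun acc p => acc ++ (PySem.List.pyRange 0 p.2 1).map (fun _ => p.1)) []
      = (PySem.List.pyRange 0 counts.length 1).foldl
          (fun acc i => acc ++ (PySem.List.pyRange 0 (PySem.List.pyGetD counts i 0) 1).map (fun _ => i)) [] := by
  rw [PySem.List.foldl_append_eq_flatMap, PySem.List.foldl_append_eq_flatMap]
  simp only [List.nil_append]
  rw [pv_flatMap_filter _ _ _ (by
    intro p _ hq
    simp only [decide_eq_false_iff_not, not_lt] at hq
    rw [PySem.List.pyRange_one_eq_nil (by omega)]
    simp)]
  rw [PySem.List.enumerate_eq_map_pyRange (xs := counts) (d := 0), pv_flatMap_map]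
  simp

theorem pieces_nil_iff (counts : List Int) :
    (PySem.List.enumerate counts).filter (fun p => p.2 > 0) = [] ↔
      (PySem.List.pyRange 0 counts.length 1).foldl
          (fun acc i => acc ++ (PySem.List.pyRange 0 (PySem.List.pyGetD counts i 0) 1).map (fun _ => i)) [] = [] := by
  rw [PySem.List.foldl_append_eq_flatMap]
  simp only [List.nil_append, List.filter_eq_nil_iff, List.flatMap_eq_nil_iff]
  constructor
  · intro hall i hi
    obtain ⟨h0, hlt⟩ := PySem.List.mem_pyRange_one.mp hi
    obtain ⟨j, hj⟩ : ∃ j : Nat, i = (j : Int) := ⟨i.toNat, (Int.toNat_of_nonneg h0).symm⟩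
    subst hj
    have hjlt : j < counts.length := by exact_mod_cast hlt
    have hmem : ((j : Int), counts[j]) ∈ PySem.List.enumerate counts := by
      rw [PySem.List.mem_enumerate_iff]
      exact ⟨j, hjlt, by simp⟩
    have := hall _ hmem
    simp only [decide_eq_true_eq] at this
    have hle : counts[j] ≤ 0 := by simpa using this
    rw [PySem.List.pyGetD_natCast, List.getD_eq_getElem _ _ hjlt,
      PySem.List.pyRange_one_eq_nil (by omega)]
    simp
  · intro hall p hp
    rw [PySem.List.mem_enumerate_iff] at hp
    obtain ⟨j, hjlt, rfl⟩ := hp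
    have hmem : ((j : Int)) ∈ PySem.List.pyRange 0 counts.length 1 := by
      rw [PySem.List.mem_pyRange_one]
      constructor <;> [omega; exact_mod_cast hjlt]
    have := hall _ hmem
    rw [List.map_eq_nil_iff, pv_range_nil_iff] at this
    rw [PySem.List.pyGetD_natCast, List.getD_eq_getElem _ _ hjlt] at this
    simp only [zero_add, decide_eq_true_eq, gt_iff_lt, not_lt]
    omega

theorem needed_eq (shapes : List (List String)) (counts : List Int)
    (hlen : counts.length ≤ shapes.length) :
    ((PySem.List.enumerate counts).map
        (fun p => p.2 * PySem.List.pyGetD (shapes.map count_cells) p.1 0)).sum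
      = ((PySem.List.pyRange 0 counts.length 1).map (fun i =>
          PySem.List.pyGetD counts i 0 *
            ((PySem.List.pyGetD shapes i []).map (fun row => PySem.Str.count row "#")).sum)).sum := by
  rw [PySem.List.enumerate_eq_map_pyRange (xs := counts) (d := 0), List.map_map]
  congr 1
  apply List.map_congr_left
  intro i hi
  obtain ⟨h0, hlt⟩ := PySem.List.mem_pyRange_one.mp hi
  obtain ⟨j, rfl⟩ : ∃ j : Nat, i = (j : Int) := ⟨i.toNat, (Int.toNat_of_nonneg h0).symm⟩
  have hjc : j < counts.length := by
    have h' := hlt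
    simp only [PySem.List.len_eq] at h'
    exact_mod_cast h'
  have hjs : j < shapes.length := by omega
  simp only [Function.comp_apply]
  rw [PySem.List.pyGetD_natCast (xs := shapes.map count_cells),
    List.getD_eq_getElem _ _ (by simpa using hjs), List.getElem_map,
    PySem.List.pyGetD_natCast (xs := shapes), List.getD_eq_getElem _ _ hjs]
  rfl

theorem grid_rel_init (w h : Int) :
    GridRel w h (List.replicate h.toNat (List.replicate w.toNat false)) 0 := by
  refine ⟨by simp, ?_, ?_⟩
  · intro r hr
    rw [List.getD_eq_getElem _ _ (by simpa using hr), List.getElem_replicate]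
    simp
  · intro r c hr hc
    have hrow : (List.replicate h.toNat (List.replicate w.toNat false)).getD r []
        = List.replicate w.toNat false := by
      rw [List.getD_eq_getElem _ _ (by simpa using hr), List.getElem_replicate]
    rw [hrow, List.getD_eq_getElem _ _ (by simpa using hc), List.getElem_replicate]
    simp [Nat.zero_testBit]

-- ===== VERDICT (by name: the statement is the Claim_ definition above) =====
theorem can_fit_region_spec : Claim_equal_can_fit_region := by
  intro w h_ shapes counts ao _hdom hpre
  obtain ⟨hlen, hcnt⟩ := hpre
  unfold Spec_can_fit_region
  simp only [can_fit_region, can_fit_region_alt]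
  rw [needed_eq shapes counts hlen]
  by_cases hneed : ((PySem.List.pyRange 0 counts.length 1).map (fun i =>
      PySem.List.pyGetD counts i 0 *
        ((PySem.List.pyGetD shapes i []).map (fun row => PySem.Str.count row "#")).sum)).sum > w * h_
  · rw [if_pos hneed, if_pos hneed]
  · rw [if_neg hneed, if_neg hneed]
    by_cases hp2p : (PySem.List.enumerate counts).filter (fun p => p.2 > 0) = []
    · rw [if_pos hp2p, if_pos ((pieces_nil_iff counts).mp hp2p)]
    · have hpB : (PySem.List.pyRange 0 counts.length 1).foldl
          (fun acc i => acc ++ (PySem.List.pyRange 0 (PySem.List.pyGetD counts i 0) 1).map (fun _ => i)) [] ≠ [] :=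
        fun hnil => hp2p ((pieces_nil_iff counts).mpr hnil)
      rw [if_neg hp2p, if_neg hpB, if_neg (by rw [pieces_eq counts]; exact hpB)]
      rw [pieces_eq counts]
      apply search_eq w h_ ao _ _ _ _ (grid_rel_init w h_) ?_ le_rfl
      -- every piece index is a valid index into all_orientations
      intro s hs
      rw [PySem.List.foldl_append_eq_flatMap] at hs
      simp only [List.nil_append, List.mem_flatMap] at hs
      obtain ⟨i, hi, hsi⟩ := hs
      obtain ⟨h0, hlt⟩ := PySem.List.mem_pyRange_one.mp hi
      obtain ⟨x, hx, rfl⟩ := List.mem_map.mp hsi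
      obtain ⟨hx0, hxlt⟩ := PySem.List.mem_pyRange_one.mp hx
      obtain ⟨j, rfl⟩ : ∃ j : Nat, i = (j : Int) := ⟨i.toNat, (Int.toNat_of_nonneg h0).symm⟩
      have hjc : j < counts.length := by exact_mod_cast hlt
      have hpos : counts[j] > 0 := by
        have : PySem.List.pyGetD counts (j : Int) 0 > 0 := by omega
        rwa [PySem.List.pyGetD_natCast, List.getD_eq_getElem _ _ hjc] at this
      have hmem : ((j : Int), counts[j]) ∈ PySem.List.enumerate counts := by
        rw [PySem.List.mem_enumerate_iff]
        exact ⟨j, hjc, by simp⟩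
      exact ⟨h0, hcnt _ hmem hpos⟩
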